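-- pv_equiv track=rewrite | github.com/slbailey/retrovue | pkg/core/src/retrovue/streaming/ffmpeg_cmd.py | get_cmd_summary
-- ===== SOURCE A (Python) =====
-- def get_cmd_summary(cmd: list[str]) -> str:
--     """
--     Get a human-readable summary of the FFmpeg command.
--
--     Args:
--         cmd: List of FFmpeg command arguments
--
--     Returns:
--         Formatted string summary of the command
--     """
--     if not cmd or cmd[0] != "ffmpeg":
--         return "Invalid FFmpeg command"
--
--     # Extract key components
--     input_file = None
--     mode = "unknown"
--     video_codec = "unknown"
--     audio_codec = "unknown"
--
--     for i, arg in enumerate(cmd):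
--         if arg == "-i" and i + 1 < len(cmd):
--             input_file = cmd[i + 1]
--         elif arg == "-c:v":
--             video_codec = cmd[i + 1] if i + 1 < len(cmd) else "unknown"
--         elif arg == "-c:a":
--             audio_codec = cmd[i + 1] if i + 1 < len(cmd) else "unknown"
--
--     if video_codec == "libx264":
--         mode = "transcode"
--     elif video_codec == "copy":
--         mode = "copy"
--
--     return f"FFmpeg {mode} command: {video_codec} video, {audio_codec} audio, input: {input_file}"
-- ===== SOURCE B (Python) =====
-- def get_cmd_summary(cmd: list[str]) -> str:
--     if not cmd or cmd[0] != "ffmpeg":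
--         return "Invalid FFmpeg command"
--     pairs = dict(zip(cmd, cmd[1:]))
--     input_file = pairs.get("-i")
--     video_codec = pairs.get("-c:v", "unknown")
--     audio_codec = pairs.get("-c:a", "unknown")
--     if video_codec == "libx264":
--         mode = "transcode"
--     elif video_codec == "copy":
--         mode = "copy"
--     else:
--         mode = "unknown"
--     return f"FFmpeg {mode} command: {video_codec} video, {audio_codec} audio, input: {input_file}"
-- ===== Notes on version B (the rewrite author's own statement) =====
-- stated objective: idiomatic
-- what changed: Replaces the indexed branching scan with building a successor map dict(zip(cmd, cmd[1:])) once and reading the three flags by constant-time lookups.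
-- intended difference: On commands whose last element is '-c:v' or '-c:a' while an earlier occurrence of that flag is followed by a real codec value (not 'unknown'), A's trailing flag overwrites that codec back to 'unknown', whereas B keeps the value that actually follows the flag, which is the intended reading of the command. — e.g. on get_cmd_summary(["ffmpeg", "-c:v", "libx264", "-c:v"]): A returns "FFmpeg unknown command: unknown video, unknown audio, input: None", B returns "FFmpeg transcode command: libx264 video, unknown audio, input: None"
import Mathlib
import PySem

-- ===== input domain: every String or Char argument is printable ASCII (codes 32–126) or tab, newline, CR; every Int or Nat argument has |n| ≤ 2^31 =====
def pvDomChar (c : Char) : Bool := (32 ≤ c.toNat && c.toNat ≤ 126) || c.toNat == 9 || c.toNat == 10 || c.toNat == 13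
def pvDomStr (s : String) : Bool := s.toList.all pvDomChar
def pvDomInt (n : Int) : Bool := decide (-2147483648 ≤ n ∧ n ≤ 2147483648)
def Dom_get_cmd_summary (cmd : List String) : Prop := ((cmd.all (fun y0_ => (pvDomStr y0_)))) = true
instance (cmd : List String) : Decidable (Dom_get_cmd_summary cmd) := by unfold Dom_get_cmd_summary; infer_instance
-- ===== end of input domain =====

-- B replaces A's indexed branching scan by building a successor map dict(zip(cmd, cmd[1:])) once and
-- reading the three flags by lookups (objective: idiomatic; equivalence is about the return value only, no mutation).

-- ===== PORT A =====
def get_cmd_summary (cmd : List String) : String :=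
  if cmd.isEmpty || (PySem.List.pyGet? cmd 0 != some "ffmpeg") then "Invalid FFmpeg command"
  else
    -- for i, arg in enumerate(cmd): the if/elif chain updating (input_file, video_codec, audio_codec)
    let st := (PySem.List.enumerate cmd).foldl
      (fun (s : Option String × String × String) (ia : Int × String) =>
        if ia.2 == "-i" && decide (ia.1 + 1 < (cmd.length : Int)) then
          (PySem.List.pyGet? cmd (ia.1 + 1), s.2.1, s.2.2)
        else if ia.2 == "-c:v" then
          (s.1, if ia.1 + 1 < (cmd.length : Int) then (PySem.List.pyGet? cmd (ia.1 + 1)).getD "unknown" else "unknown", s.2.2)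
        else if ia.2 == "-c:a" then
          (s.1, s.2.1, if ia.1 + 1 < (cmd.length : Int) then (PySem.List.pyGet? cmd (ia.1 + 1)).getD "unknown" else "unknown")
        else s)
      (none, "unknown", "unknown")
    let mode := if st.2.1 == "libx264" then "transcode" else if st.2.1 == "copy" then "copy" else "unknown"
    "FFmpeg " ++ mode ++ " command: " ++ st.2.1 ++ " video, " ++ st.2.2 ++ " audio, input: " ++
      (match st.1 with | some s => s | none => "None")

-- ===== PORT B =====
def get_cmd_summary_alt (cmd : List String) : String :=
  if cmd.isEmpty || (PySem.List.pyGet? cmd 0 != some "ffmpeg") then "Invalid FFmpeg command"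
  else
    let pairs : PySem.Dict String String := PySem.Dict.ofList (List.zip cmd cmd.tail)   -- dict(zip(cmd, cmd[1:]))
    let input_file := pairs.get? "-i"
    let video_codec := pairs.getD "-c:v" "unknown"
    let audio_codec := pairs.getD "-c:a" "unknown"
    let mode := if video_codec == "libx264" then "transcode" else if video_codec == "copy" then "copy" else "unknown"
    "FFmpeg " ++ mode ++ " command: " ++ video_codec ++ " video, " ++ audio_codec ++ " audio, input: " ++
      (match input_file with | some s => s | none => "None")

-- ===== PRECONDITION & SPEC =====
-- On commands whose last element is "-c:v" or "-c:a" while an earlier occurrence of that flag is followed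
-- by a real codec value (not "unknown"), A's trailing flag overwrites that codec back to "unknown",
-- whereas B keeps the value that actually follows the flag, which is the intended reading of the command.
def D_get_cmd_summary (cmd : List String) : Prop :=
  cmd.head? = some "ffmpeg" ∧ ∃ f ∈ (["-c:v", "-c:a"] : List String), cmd.getLast? = some f ∧
    ((cmd.zip cmd.tail).reverse.find? (fun p => p.1 == f)).any (fun p => p.2 != "unknown") = true

instance (cmd : List String) : Decidable (D_get_cmd_summary cmd) := by
  unfold D_get_cmd_summary; infer_instance

def Spec_get_cmd_summary (cmd : List String) (out : String) : Prop :=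
  ¬ D_get_cmd_summary cmd → out = get_cmd_summary_alt cmd
instance (cmd : List String) (out : String) : Decidable (Spec_get_cmd_summary cmd out) := by
  unfold Spec_get_cmd_summary; infer_instance

def pvDiffWitness_get_cmd_summary : List String := ["ffmpeg", "-c:v", "libx264", "-c:v"]
def pvDiffWitnessOut_get_cmd_summary : String × String :=
  ("FFmpeg unknown command: unknown video, unknown audio, input: None",
   "FFmpeg transcode command: libx264 video, unknown audio, input: None")

-- ===== CLAIM (what is proved, stated in full; the proofs are below) =====
def Claim_unchanged_get_cmd_summary : Prop :=
  ∀ (cmd : List String), Dom_get_cmd_summary cmd → Spec_get_cmd_summary cmd (get_cmd_summary cmd)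
def Claim_changed_get_cmd_summary : Prop :=
  Dom_get_cmd_summary (pvDiffWitness_get_cmd_summary) ∧ D_get_cmd_summary (pvDiffWitness_get_cmd_summary) ∧
  get_cmd_summary (pvDiffWitness_get_cmd_summary) = pvDiffWitnessOut_get_cmd_summary.1 ∧
  get_cmd_summary_alt (pvDiffWitness_get_cmd_summary) = pvDiffWitnessOut_get_cmd_summary.2 ∧
  pvDiffWitnessOut_get_cmd_summary.1 ≠ pvDiffWitnessOut_get_cmd_summary.2
def Claim_exact_get_cmd_summary : Prop :=
  ∀ (cmd : List String), Dom_get_cmd_summary cmd → D_get_cmd_summary cmd →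
    get_cmd_summary cmd ≠ get_cmd_summary_alt cmd

-- ===== LEMMAS AND PROOFS =====

-- the value following the last non-final occurrence of flag k in cmd
def pvPairVal (cmd : List String) (k : String) : Option String :=
  ((List.zip cmd cmd.tail).reverse.find? (fun p => p.1 == k)).map (·.2)

-- the elementwise step of A's loop once the index bookkeeping is replaced by "this element, paired with its successor"
def pvStepA (s : Option String × String × String) (e : String × Option String) :
    Option String × String × String :=
  if e.1 == "-i" && e.2.isSome then (e.2, s.2.1, s.2.2)
  else if e.1 == "-c:v" then (s.1, e.2.getD "unknown", s.2.2)
  else if e.1 == "-c:a" then (s.1, s.2.1, e.2.getD "unknown")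
  else s

-- each element of cmd paired with its successor (none for the last element)
def pvSuccs (cmd : List String) : List (String × Option String) :=
  cmd.zip (cmd.tail.map some ++ [none])

theorem pvSuccs_cons (a : String) (r : List String) :
    pvSuccs (a :: r) = (a, r.head?) :: pvSuccs r := by
  cases r with
  | nil => simp [pvSuccs]
  | cons y t => simp [pvSuccs]

theorem pv_getElem?_mid (pre r : List String) (a : String) :
    (pre ++ a :: r)[pre.length + 1]? = r.head? := by
  rw [List.getElem?_append_right (by omega)]
  simp [List.head?_eq_getElem?]

-- A's enumerate-fold is the fold of pvStepA over pvSuccs of the remaining suffix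
theorem pv_foldA_eq (cmd : List String) :
    ∀ (rest pre : List String) (s : Option String × String × String), cmd = pre ++ rest →
    (PySem.List.enumerate rest (pre.length : Int)).foldl
      (fun (s : Option String × String × String) (ia : Int × String) =>
        if ia.2 == "-i" && decide (ia.1 + 1 < (cmd.length : Int)) then
          (PySem.List.pyGet? cmd (ia.1 + 1), s.2.1, s.2.2)
        else if ia.2 == "-c:v" then
          (s.1, if ia.1 + 1 < (cmd.length : Int) then (PySem.List.pyGet? cmd (ia.1 + 1)).getD "unknown" else "unknown", s.2.2)
        else if ia.2 == "-c:a" then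
          (s.1, s.2.1, if ia.1 + 1 < (cmd.length : Int) then (PySem.List.pyGet? cmd (ia.1 + 1)).getD "unknown" else "unknown")
        else s) s
    = (pvSuccs rest).foldl pvStepA s := by
  intro rest
  induction rest with
  | nil =>
    intro pre s h
    simp [pvSuccs, PySem.List.enumerate_nil]
  | cons a r ih =>
    intro pre s h
    rw [PySem.List.enumerate_cons, pvSuccs_cons]
    simp only [List.foldl_cons]
    have hget : PySem.List.pyGet? cmd ((pre.length : Int) + 1) = r.head? := by
      have hlen : ((pre.length : Int) + 1) = (((pre ++ [a]).length : Nat) : Int) := by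
        simp
      rw [hlen, PySem.List.pyGet?_natCast, h]
      have : (pre ++ [a]).length = pre.length + 1 := by simp
      rw [this]
      exact pv_getElem?_mid pre r a
    have hcmp : ((pre.length : Int) + 1 < (cmd.length : Int)) ↔ (r.head?.isSome = true) := by
      subst h
      cases r with
      | nil => simp
      | cons y t => simp
    have hbool : decide ((pre.length : Int) + 1 < (cmd.length : Int)) = r.head?.isSome := by
      by_cases hP : (pre.length : Int) + 1 < (cmd.length : Int)
      · have hx := hcmp.mp hP
        simp [hP, hx]
      · have hx : ¬ (r.head?.isSome = true) := fun hs => hP (hcmp.mpr hs)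
        simp only [Bool.not_eq_true] at hx
        simp [hP, hx]
    have hval : (if (pre.length : Int) + 1 < (cmd.length : Int)
          then (PySem.List.pyGet? cmd ((pre.length : Int) + 1)).getD "unknown" else "unknown")
        = r.head?.getD "unknown" := by
      cases hr : r.head? with
      | none =>
        rw [if_neg]
        · simp
        · intro hc
          have := hcmp.mp hc
          simp [hr] at this
      | some y =>
        rw [if_pos (hcmp.mpr (by simp [hr]))]
        rw [hget, hr]
    have hstep :
        (if a == "-i" && decide ((pre.length : Int) + 1 < (cmd.length : Int)) then
          (PySem.List.pyGet? cmd ((pre.length : Int) + 1), s.2.1, s.2.2)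
        else if a == "-c:v" then
          (s.1, if (pre.length : Int) + 1 < (cmd.length : Int) then (PySem.List.pyGet? cmd ((pre.length : Int) + 1)).getD "unknown" else "unknown", s.2.2)
        else if a == "-c:a" then
          (s.1, s.2.1, if (pre.length : Int) + 1 < (cmd.length : Int) then (PySem.List.pyGet? cmd ((pre.length : Int) + 1)).getD "unknown" else "unknown")
        else s) = pvStepA s (a, r.head?) := by
      rw [hbool, hval, hget]
      rfl
    rw [hstep]
    have hrec := ih (pre ++ [a]) (pvStepA s (a, r.head?)) (by simpa using h)
    have hcast : (((pre ++ [a]).length : Nat) : Int) = (pre.length : Int) + 1 := by simp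
    rw [hcast] at hrec
    exact hrec

theorem pv_foldl_lastwins {α β : Type} (p : α → Bool) (n : α → β) :
    ∀ (l : List α) (a : β),
      l.foldl (fun acc e => if p e then n e else acc) a = ((l.reverse.find? p).map n).getD a := by
  intro l
  induction l with
  | nil => intro a; simp
  | cons e t ih =>
    intro a
    simp only [List.foldl_cons, List.reverse_cons, List.find?_append]
    rw [ih]
    cases h : t.reverse.find? p with
    | some x => simp
    | none =>
      by_cases hp : p e <;> simp [List.find?, hp]

-- pvStepA updates the three components independently
theorem pv_stepA_split (s : Option String × String × String) (e : String × Option String) :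
    pvStepA s e =
      ((if e.1 == "-i" && e.2.isSome then e.2 else s.1),
       (if e.1 == "-c:v" then e.2.getD "unknown" else s.2.1),
       (if e.1 == "-c:a" then e.2.getD "unknown" else s.2.2)) := by
  unfold pvStepA
  by_cases h1 : e.1 = "-i" <;> by_cases h2 : e.1 = "-c:v" <;> by_cases h3 : e.1 = "-c:a" <;>
    simp_all
  cases he : e.2.isSome
  · simp
  · simp

theorem pv_fold_stepA (l : List (String × Option String)) (s : Option String × String × String) :
    l.foldl pvStepA s =
      (l.foldl (fun a e => if e.1 == "-i" && e.2.isSome then e.2 else a) s.1,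
       l.foldl (fun a e => if e.1 == "-c:v" then e.2.getD "unknown" else a) s.2.1,
       l.foldl (fun a e => if e.1 == "-c:a" then e.2.getD "unknown" else a) s.2.2) := by
  induction l generalizing s with
  | nil => simp
  | cons e t ih => simp only [List.foldl_cons, ih, pv_stepA_split]

-- B's dict lookup is a reverse find over the inserted pair list
theorem pv_get?_update (l : List (String × String)) (d : PySem.Dict String String) (k : String) :
    (d.update l).get? k = ((l.reverse.find? (fun p => p.1 == k)).map (·.2)).or (d.get? k) := by
  induction l generalizing d with
  | nil => simp [PySem.Dict.update]
  | cons p t ih =>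
    have hu : (d.update (p :: t)) = ((d.insert p.1 p.2).update t) := by
      simp [PySem.Dict.update]
    rw [hu, ih]
    simp only [List.reverse_cons, List.find?_append, Option.map_or, Option.or_assoc]
    congr 1
    rw [PySem.Dict.get?_insert]
    by_cases hp : p.1 = k
    · subst hp; simp [List.find?]
    · have hb : (p.1 == k) = false := by simp [hp]
      simp [List.find?, hb, show ¬ k = p.1 from fun h => hp h.symm]

theorem pv_pairs_get? (cmd : List String) (k : String) :
    (PySem.Dict.ofList (List.zip cmd cmd.tail)).get? k = pvPairVal cmd k := by
  show ((PySem.Dict.empty).update (List.zip cmd cmd.tail)).get? k = pvPairVal cmd k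
  rw [pv_get?_update]
  simp [pvPairVal, PySem.Dict.get?_empty]

-- pvSuccs of a nonempty list: the zipped pairs (with some) plus the trailing (last, none)
theorem pv_succs_decomp : ∀ (cmd : List String) (h : cmd ≠ []),
    pvSuccs cmd = ((cmd.zip cmd.tail).map (Prod.map id some)) ++ [(cmd.getLast h, none)] := by
  intro cmd
  induction cmd with
  | nil => intro h; exact absurd rfl h
  | cons a t ih =>
    intro h
    cases t with
    | nil => simp [pvSuccs]
    | cons y u =>
      rw [pvSuccs_cons, ih (by simp)]
      simp [List.getLast_cons]

-- the three final field values, reduced to pvPairVal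
theorem pv_input_eq (cmd : List String) (h : cmd ≠ []) :
    (pvSuccs cmd).foldl (fun a e => if e.1 == "-i" && e.2.isSome then e.2 else a) none
      = pvPairVal cmd "-i" := by
  rw [pv_foldl_lastwins, pv_succs_decomp cmd h, List.reverse_append]
  simp only [List.reverse_cons, List.reverse_nil, List.nil_append, List.singleton_append,
    List.find?_cons]
  have : ((("-i" : String) == "-i") && (none : Option String).isSome) = false := by simp
  simp only [Option.isSome_none, Bool.and_false]
  rw [← List.map_reverse, List.find?_map]
  have hq : ((fun (e : String × Option String) => e.1 == "-i" && e.2.isSome) ∘ (Prod.map id some))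
      = (fun (p : String × String) => p.1 == "-i") := by
    funext p; simp [Prod.map]
  rw [hq]
  cases hf : List.find? (fun (p : String × String) => p.1 == "-i") (cmd.zip cmd.tail).reverse with
  | none => simp [pvPairVal, hf]
  | some x => simp [pvPairVal, hf, Prod.map]

theorem pv_codec_eq (cmd : List String) (h : cmd ≠ []) (k : String)
    (hk : cmd.getLast h ≠ k ∨ pvPairVal cmd k = none ∨ pvPairVal cmd k = some "unknown") :
    (pvSuccs cmd).foldl (fun a e => if e.1 == k then e.2.getD "unknown" else a) "unknown"
      = (pvPairVal cmd k).getD "unknown" := by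
  rw [pv_foldl_lastwins, pv_succs_decomp cmd h, List.reverse_append]
  simp only [List.reverse_cons, List.reverse_nil, List.nil_append, List.singleton_append,
    List.find?_cons]
  by_cases hz : cmd.getLast h = k
  · have hbk : ((cmd.getLast h) == k) = true := by simp [hz]
    rw [hbk]
    rcases hk with hk | hk | hk
    · exact absurd hz hk
    · simp [hk]
    · simp [hk]
  · have hbk : ((cmd.getLast h) == k) = false := by simp [hz]
    rw [hbk]
    rw [← List.map_reverse, List.find?_map]
    have hq : ((fun (e : String × Option String) => e.1 == k) ∘ (Prod.map id some))
        = (fun (p : String × String) => p.1 == k) := by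
      funext p; simp [Prod.map]
    rw [hq]
    cases hf : List.find? (fun (p : String × String) => p.1 == k) (cmd.zip cmd.tail).reverse with
    | none => simp [pvPairVal, hf]
    | some x => simp [pvPairVal, hf, Prod.map]

theorem pv_codec_last (cmd : List String) (h : cmd ≠ []) (k : String)
    (hz : cmd.getLast h = k) :
    (pvSuccs cmd).foldl (fun a e => if e.1 == k then e.2.getD "unknown" else a) "unknown"
      = "unknown" := by
  rw [pv_foldl_lastwins, pv_succs_decomp cmd h, List.reverse_append]
  simp only [List.reverse_cons, List.reverse_nil, List.nil_append, List.singleton_append,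
    List.find?_cons]
  have hbk : ((cmd.getLast h) == k) = true := by simp [hz]
  rw [hbk]
  simp

-- string cancellation helpers
theorem pv_str_cancel_right (x y s : String) (h : x ++ s = y ++ s) : x = y := by
  apply String.toList_inj.mp
  have hl := congrArg String.toList h
  simp only [String.toList_append] at hl
  exact List.append_cancel_right hl

theorem pv_str_cancel_left (s x y : String) (h : s ++ x = s ++ y) : x = y := by
  apply String.toList_inj.mp
  have hl := congrArg String.toList h
  simp only [String.toList_append] at hl
  exact List.append_cancel_left hl

-- the summary string as a function of the three extracted fields
def pvShow (inp : Option String) : String := match inp with | some s => s | none => "None"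
def pvCore (v : String) : String :=
  "FFmpeg " ++ (if v == "libx264" then "transcode" else if v == "copy" then "copy" else "unknown")
    ++ " command: " ++ v
def pvRender (inp : Option String) (v a : String) : String :=
  pvCore v ++ (" video, " ++ a ++ " audio, input: " ++ pvShow inp)

theorem pvRender_video_ne (inp : Option String) (a v : String) (hv : v ≠ "unknown") :
    pvRender inp "unknown" a ≠ pvRender inp v a := by
  intro h
  have hc := pv_str_cancel_right _ _ _ h
  by_cases h1 : v = "libx264"
  · subst h1; exact absurd hc (by decide)
  · by_cases h2 : v = "copy"
    · subst h2; exact absurd hc (by decide)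
    · have hb1 : (v == "libx264") = false := by simp [h1]
      have hb2 : (v == "copy") = false := by simp [h2]
      simp only [pvCore, hb1, hb2, Bool.false_eq_true, if_false] at hc
      have hc2 := pv_str_cancel_left _ _ _ hc
      exact hv hc2.symm

theorem pvRender_audio_ne (inp : Option String) (v a : String) (ha : a ≠ "unknown") :
    pvRender inp v "unknown" ≠ pvRender inp v a := by
  intro h
  have hc := pv_str_cancel_left _ _ _ h
  have hc2 := pv_str_cancel_right _ _ _ hc
  have hc3 := pv_str_cancel_right _ _ _ hc2
  exact ha (pv_str_cancel_left _ _ _ hc3).symm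

-- evaluating the two ports past the guard
theorem pv_eval_A (cmd : List String)
    (h : (cmd.isEmpty || (PySem.List.pyGet? cmd 0 != some "ffmpeg")) = false) :
    get_cmd_summary cmd = pvRender
      ((pvSuccs cmd).foldl (fun a e => if e.1 == "-i" && e.2.isSome then e.2 else a) none)
      ((pvSuccs cmd).foldl (fun a e => if e.1 == "-c:v" then e.2.getD "unknown" else a) "unknown")
      ((pvSuccs cmd).foldl (fun a e => if e.1 == "-c:a" then e.2.getD "unknown" else a) "unknown") := by
  have hA := pv_foldA_eq cmd cmd [] (none, "unknown", "unknown") rfl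
  simp only [List.length_nil, Nat.cast_zero] at hA
  simp only [get_cmd_summary, h, Bool.false_eq_true, if_false]
  rw [hA, pv_fold_stepA]
  simp [pvRender, pvCore, pvShow, String.append_assoc]

theorem pv_eval_B (cmd : List String)
    (h : (cmd.isEmpty || (PySem.List.pyGet? cmd 0 != some "ffmpeg")) = false) :
    get_cmd_summary_alt cmd = pvRender (pvPairVal cmd "-i")
      ((pvPairVal cmd "-c:v").getD "unknown")
      ((pvPairVal cmd "-c:a").getD "unknown") := by
  simp only [get_cmd_summary_alt, h, Bool.false_eq_true, if_false]
  rw [PySem.Dict.getD_eq_get?_getD, PySem.Dict.getD_eq_get?_getD,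
      pv_pairs_get?, pv_pairs_get?, pv_pairs_get?]
  simp [pvRender, pvCore, pvShow, String.append_assoc]

-- facts shared by the two final theorems
theorem pv_guard_false (cmd : List String) (hhead : cmd.head? = some "ffmpeg") :
    (cmd.isEmpty || (PySem.List.pyGet? cmd 0 != some "ffmpeg")) = false := by
  cases cmd with
  | nil => simp at hhead
  | cons a t =>
    simp at hhead
    have h0 : PySem.List.pyGet? (a :: t) ((0 : Nat) : Int) = (a :: t)[0]? :=
      PySem.List.pyGet?_natCast (a :: t) 0
    simp at h0
    simp [hhead]

-- ===== VERDICT (by name: the statement is the Claim_ definition above) =====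
theorem get_cmd_summary_spec : Claim_unchanged_get_cmd_summary := by
  intro cmd _ hD
  by_cases hguard : (cmd.isEmpty || (PySem.List.pyGet? cmd 0 != some "ffmpeg")) = true
  · simp only [get_cmd_summary, get_cmd_summary_alt, hguard, if_pos]
  · have hguard' : (cmd.isEmpty || (PySem.List.pyGet? cmd 0 != some "ffmpeg")) = false := by
      simpa using hguard
    have hne : cmd ≠ [] := by
      intro hnil; subst hnil; simp at hguard'
    have hhead : cmd.head? = some "ffmpeg" := by
      have h0 : PySem.List.pyGet? cmd 0 = some "ffmpeg" := by
        simp at hguard'; exact hguard'.2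
      have hx : PySem.List.pyGet? cmd ((0 : Nat) : Int) = cmd[0]? := PySem.List.pyGet?_natCast cmd 0
      simp at hx
      rw [hx] at h0
      rwa [← List.head?_eq_getElem?] at h0
    have hnD : ∀ k, k ∈ (["-c:v", "-c:a"] : List String) →
        (cmd.getLast hne ≠ k ∨ pvPairVal cmd k = none ∨ pvPairVal cmd k = some "unknown") := by
      intro k hk
      by_cases hz : cmd.getLast hne = k
      · right
        cases hf : (cmd.zip cmd.tail).reverse.find? (fun p => p.1 == k) with
        | none => left; simp [pvPairVal, hf]
        | some x =>
          right
          have hx2 : x.2 = "unknown" := by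
            by_contra hu
            apply hD
            refine ⟨hhead, k, hk, ?_, ?_⟩
            · rw [List.getLast?_eq_some_getLast hne, hz]
            · simp [hf, hu]
          simp [pvPairVal, hf, hx2]
      · left; exact hz
    rw [pv_eval_A cmd hguard', pv_eval_B cmd hguard']
    rw [pv_input_eq cmd hne,
        pv_codec_eq cmd hne "-c:v" (hnD _ (by simp)),
        pv_codec_eq cmd hne "-c:a" (hnD _ (by simp))]

theorem get_cmd_summary_changed : Claim_changed_get_cmd_summary := by
  unfold Claim_changed_get_cmd_summary
  refine ⟨by decide, by decide, ?_, ?_, by decide⟩ <;> rfl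

theorem get_cmd_summary_tight : Claim_exact_get_cmd_summary := by
  intro cmd _ hD
  obtain ⟨hhead, f, hfmem, hlast, hany⟩ := hD
  have hguard' := pv_guard_false cmd hhead
  have hne : cmd ≠ [] := by
    intro hnil; subst hnil; simp at hhead
  have hz : cmd.getLast hne = f := by
    rw [List.getLast?_eq_some_getLast hne] at hlast
    exact Option.some_inj.mp hlast
  obtain ⟨x, hfind, hxu⟩ : ∃ x, (cmd.zip cmd.tail).reverse.find? (fun p => p.1 == f) = some x ∧
      x.2 ≠ "unknown" := by
    cases hf : (cmd.zip cmd.tail).reverse.find? (fun p => p.1 == f) with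
    | none => rw [hf] at hany; simp at hany
    | some x =>
      rw [hf] at hany
      refine ⟨x, rfl, ?_⟩
      simpa using hany
  have hpv : pvPairVal cmd f = some x.2 := by simp [pvPairVal, hfind]
  rw [pv_eval_A cmd hguard', pv_eval_B cmd hguard']
  rw [pv_input_eq cmd hne]
  rcases (by simpa using hfmem : f = "-c:v" ∨ f = "-c:a") with hf | hf
  · subst hf
    rw [pv_codec_eq cmd hne "-c:a" (Or.inl (by rw [hz]; decide)),
        pv_codec_last cmd hne "-c:v" hz, hpv]
    exact pvRender_video_ne _ _ _ hxu
  · subst hf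
    rw [pv_codec_eq cmd hne "-c:v" (Or.inl (by rw [hz]; decide)),
        pv_codec_last cmd hne "-c:a" hz, hpv]
    exact pvRender_audio_ne _ _ _ hxu
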